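-- pv_equiv track=rewrite | github.com/nobelleprize/leetcode | hackerrank/solution.py | solution
-- ===== SOURCE A (Python) =====
-- def solution(s, n):
--     count = 0
--     result = 0
--     for char in s:
--         if char == "a":
--             count += 1
--     multiples = n // len(s)
--
--     missing = n % len(s)
--
--     result += count * multiples
--
--     for i in s[:missing]:
--         if i == "a":
--             result += 1
--
--     return result
-- ===== SOURCE B (Python) =====
-- def solution(s, n):
--     L = len(s)
--     return sum(max(0, -((p - n) // L)) for p, c in enumerate(s) if c == "a")
-- ===== Notes on version B (the rewrite author's own statement) =====
-- stated objective: alternative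
-- what changed: Instead of A's global 'a'-count times n//len(s) plus a second scan of the partial copy s[:n%len(s)], B makes one pass over enumerate(s) and, for each position p holding 'a', adds the number of hits of the arithmetic progression p, p+len(s), ... below n computed by a ceiling division max(0, -((p - n)//len(s))).
-- outside the precondition, e.g. on solution('a', -1): A returns -1, B returns 0
import Mathlib
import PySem

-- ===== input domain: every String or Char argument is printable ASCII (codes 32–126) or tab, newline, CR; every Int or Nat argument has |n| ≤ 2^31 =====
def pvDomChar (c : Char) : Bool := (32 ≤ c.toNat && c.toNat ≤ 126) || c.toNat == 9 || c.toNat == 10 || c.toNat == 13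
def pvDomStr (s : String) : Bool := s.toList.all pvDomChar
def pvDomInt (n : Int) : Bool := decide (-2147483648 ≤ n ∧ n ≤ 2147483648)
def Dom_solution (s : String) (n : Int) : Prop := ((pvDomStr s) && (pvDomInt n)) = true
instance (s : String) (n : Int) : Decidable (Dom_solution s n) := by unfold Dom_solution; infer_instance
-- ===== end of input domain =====

-- B replaces A's global count × quotient + partial rescan by one pass that, for each 'a' position p,
-- adds the number of hits of the progression p, p+len, p+2·len, … below n via a ceiling division
-- (objective: alternative).

-- ===== PORT A =====
-- count 'a' in s, multiply by n // len(s), then scan the partial copy s[:n % len(s)]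
def solution (s : String) (n : Int) : Int :=
  let count : Int := s.toList.foldl (fun c ch => if ch == 'a' then c + 1 else c) 0
  let multiples : Int := PySem.Int.floordiv n (PySem.Str.len s)
  let missing : Int := PySem.Int.mod n (PySem.Str.len s)
  let result : Int := 0 + count * multiples
  (PySem.List.slice s.toList none (some missing)).foldl
    (fun r i => if i == 'a' then r + 1 else r) result

-- ===== PORT B =====
-- L = len(s); sum over enumerate(s) of max(0, -((p - n) // L)) for the characters equal to 'a'
def solution_alt (s : String) (n : Int) : Int :=
  let L : Int := PySem.Str.len s
  (PySem.List.enumerate s.toList 0).foldl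
    (fun acc pc => if pc.2 == 'a' then acc + max 0 (-(PySem.Int.floordiv (pc.1 - n) L)) else acc) 0

-- ===== PRECONDITION & SPEC =====
-- Pre_ excludes empty s, where A raises ZeroDivisionError, and negative n (a count of
-- characters), which is outside the task's natural domain: A's values there are accidental
-- leftovers of floor division (e.g. solution("a", -1) = -1, while B returns 0).
def Pre_solution (s : String) (n : Int) : Prop := s ≠ "" ∧ 0 ≤ n
instance (s : String) (n : Int) : Decidable (Pre_solution s n) := by unfold Pre_solution; infer_instance
def pvWitness_solution : String × Int := ("abca", 10)

def Spec_solution (s : String) (n : Int) (out : Int) : Prop := out = solution_alt s n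
instance (s : String) (n : Int) (out : Int) : Decidable (Spec_solution s n out) := by unfold Spec_solution; infer_instance

-- ===== CLAIM (what is proved, stated in full; the proofs are below) =====
def Claim_equal_solution : Prop := ∀ (s : String) (n : Int), Dom_solution s n → Pre_solution s n → Spec_solution s n (solution s n)

-- ===== LEMMAS AND PROOFS =====

-- the per-position weight of B, in closed form: quotient plus one exactly below the remainder
lemma weight_eq (m l : Nat) (hl : 0 < l) (i : Int) (h0 : 0 ≤ i) (hi : i < (l : Int)) :
    max 0 (-(PySem.Int.floordiv (i - (m : Int)) (l : Int)))
      = ((m / l : Nat) : Int) + (if i < ((m % l : Nat) : Int) then 1 else 0) := by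
  have hdm : ((m / l : Nat) : Int) * l + ((m % l : Nat) : Int) = (m : Int) := by
    exact_mod_cast Nat.div_add_mod' m l
  have hr : ((m % l : Nat) : Int) < (l : Int) := by exact_mod_cast Nat.mod_lt m hl
  have hr0 : 0 ≤ ((m % l : Nat) : Int) := by positivity
  have hQ0 : 0 ≤ ((m / l : Nat) : Int) := by positivity
  have hneg : i - (m : Int) = -((m : Int) - i) := by ring
  rw [hneg]
  by_cases hcase : i < ((m % l : Nat) : Int)
  · rw [if_pos hcase]
    have hval : -(PySem.Int.floordiv (-((m : Int) - i)) (l : Int)) = ((m / l : Nat) : Int) + 1 :=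
      (PySem.Int.neg_floordiv_neg_eq_iff_of_pos (by exact_mod_cast hl)).mpr
        ⟨by linarith, by linarith⟩
    rw [hval]
    exact max_eq_right (by linarith)
  · rw [if_neg hcase]
    have hval : -(PySem.Int.floordiv (-((m : Int) - i)) (l : Int)) = ((m / l : Nat) : Int) :=
      (PySem.Int.neg_floordiv_neg_eq_iff_of_pos (by exact_mod_cast hl)).mpr
        ⟨by linarith, by linarith⟩
    rw [hval]
    simpa using max_eq_right hQ0

-- B's loop over enumerate, evaluated for a weight of the form Q + [i < R]
lemma loop_eval (w : Int → Int) (Q R : Int) :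
    ∀ (t : List Char) (j a : Int),
      (∀ i : Int, j ≤ i → i < j + t.length → w i = Q + (if i < R then 1 else 0)) →
      (PySem.List.enumerate t j).foldl
          (fun acc pc => if pc.2 == 'a' then acc + w pc.1 else acc) a
        = a + Q * (List.countP (· == 'a') t : Int)
            + (List.countP (· == 'a') (t.take (R - j).toNat) : Int) := by
  intro t
  induction t with
  | nil => intro j a _; simp
  | cons c tl ih =>
    intro j a hw
    rw [PySem.List.enumerate_cons, List.foldl_cons]
    have hwj : w j = Q + (if j < R then 1 else 0) := hw j le_rfl (by simp only [List.length_cons]; push_cast; omega)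
    have hw' : ∀ i : Int, j + 1 ≤ i → i < (j + 1) + tl.length → w i = Q + (if i < R then 1 else 0) := by
      intro i h1 h2
      exact hw i (by omega) (by simp only [List.length_cons]; push_cast; omega)
    rw [ih (j + 1) _ hw']
    have htake : List.take (R - j).toNat (c :: tl)
        = if j < R then c :: List.take (R - (j + 1)).toNat tl else [] := by
      by_cases hjR : j < R
      · have : (R - j).toNat = (R - (j + 1)).toNat + 1 := by omega
        rw [this, if_pos hjR, List.take_succ_cons]
      · have : (R - j).toNat = 0 := by omega
        rw [this, if_neg hjR, List.take_zero]
    by_cases hjR : j < R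
    · rw [htake, if_pos hjR]
      by_cases hc : (c == 'a') = true
      · simp only [hc, ite_true, hwj, if_pos hjR, List.countP_cons, ite_true]
        push_cast
        ring
      · simp only [hc, List.countP_cons]
        push_cast
        ring
    · have h0 : (R - (j + 1)).toNat = 0 := by omega
      rw [htake, if_neg hjR, h0, List.take_zero]
      by_cases hc : (c == 'a') = true
      · simp only [hc, ite_true, hwj, if_neg hjR, List.countP_cons, ite_true]
        push_cast
        ring
      · simp only [hc, List.countP_cons]
        push_cast
        ring

-- ===== VERDICT (by name: the statement is the Claim_ definition above) =====
theorem solution_spec : Claim_equal_solution := by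
  intro s n _ hpre
  obtain ⟨hs, hn⟩ := hpre
  have hL : s.toList ≠ [] := fun h => hs (by
    have := congrArg String.ofList h
    simpa using this)
  have hl : 0 < s.toList.length := List.length_pos_of_ne_nil hL
  obtain ⟨m, rfl⟩ : ∃ m : Nat, n = (m : Int) := ⟨n.toNat, (Int.toNat_of_nonneg hn).symm⟩
  unfold Spec_solution solution solution_alt
  simp only [PySem.Str.len_eq, PySem.Int.floordiv_natCast, PySem.Int.mod_natCast,
    PySem.List.slice_to_natCast, PySem.List.foldl_count_if]
  rw [loop_eval (fun i => max 0 (-(PySem.Int.floordiv (i - (m : Int)) (s.toList.length : Int))))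
      ((m / s.toList.length : Nat) : Int) ((m % s.toList.length : Nat) : Int) s.toList 0 0
      (fun i h0 hi => weight_eq m s.toList.length hl i h0 (by simpa using hi))]
  have : ((((m % s.toList.length : Nat) : Int) - 0).toNat) = m % s.toList.length := by omega
  rw [this]
  push_cast
  ring
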